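-- pv_equiv track=rewrite | github.com/Yixibuer/kidsAutoTest | base/testcase.py | _count_diff_all_purpose
-- ===== SOURCE A (Python) =====
-- import collections
--
-- _Mismatch = collections.namedtuple('Mismatch', 'actual expected value')
--
-- def _count_diff_all_purpose(actual, expected):
--     'Returns list of (cnt_act, cnt_exp, elem) triples where the counts differ'
--     # elements need not be hashable
--     s, t = list(actual), list(expected)
--     m, n = len(s), len(t)
--     NULL = object()
--     result = []
--     for i, elem in enumerate(s):
--         if elem is NULL:
--             continue
--         cnt_s = cnt_t = 0
--         for j in range(i, m):
--             if s[j] == elem: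
--                 cnt_s += 1
--                 s[j] = NULL
--         for j, other_elem in enumerate(t):
--             if other_elem == elem:
--                 cnt_t += 1
--                 t[j] = NULL
--         if cnt_s != cnt_t:
--             diff = _Mismatch(cnt_s, cnt_t, elem)
--             result.append(diff)
--
--     for i, elem in enumerate(t):
--         if elem is NULL:
--             continue
--         cnt_t = 0
--         for j in range(i, n):
--             if t[j] == elem:
--                 cnt_t += 1
--                 t[j] = NULL
--         diff = _Mismatch(0, cnt_t, elem)
--         result.append(diff)
--     return result
-- ===== SOURCE B (Python) =====
-- import collections
--
-- _Mismatch = collections.namedtuple('Mismatch', 'actual expected value')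
--
-- def _count_diff_all_purpose(actual, expected):
--     'Returns list of (cnt_act, cnt_exp, elem) triples where the counts differ'
--     # elements need not be hashable: build an insertion-ordered association-list
--     # tally of each sequence in one pass, then compare the two tallies.
--     def tally(seq):
--         pairs = []              # [elem, count], first-occurrence order
--         for x in seq:
--             for p in pairs:
--                 if p[0] == x:
--                     p[1] += 1
--                     break
--             else:
--                 pairs.append([x, 1])
--         return pairs
--
--     def find(pairs, x):
--         for p in pairs:
--             if p[0] == x:
--                 return p[1]
--         return 0
--
--     cs, ct = tally(actual), tally(expected)
--     result = []
--     for elem, cnt_s in cs: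
--         cnt_t = find(ct, elem)
--         if cnt_s != cnt_t:
--             result.append(_Mismatch(cnt_s, cnt_t, elem))
--     for elem, cnt_t in ct:
--         if find(cs, elem) == 0:
--             result.append(_Mismatch(0, cnt_t, elem))
--     return result
-- ===== Notes on version B (the rewrite author's own statement) =====
-- stated objective: alternative
-- what changed: Replaces A's destructive count-and-NULL-out sentinel scans with a counting phase that builds an insertion-ordered association-list tally of each sequence in a single pass, followed by a pure comparison phase over the two tallies.
import Mathlib
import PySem

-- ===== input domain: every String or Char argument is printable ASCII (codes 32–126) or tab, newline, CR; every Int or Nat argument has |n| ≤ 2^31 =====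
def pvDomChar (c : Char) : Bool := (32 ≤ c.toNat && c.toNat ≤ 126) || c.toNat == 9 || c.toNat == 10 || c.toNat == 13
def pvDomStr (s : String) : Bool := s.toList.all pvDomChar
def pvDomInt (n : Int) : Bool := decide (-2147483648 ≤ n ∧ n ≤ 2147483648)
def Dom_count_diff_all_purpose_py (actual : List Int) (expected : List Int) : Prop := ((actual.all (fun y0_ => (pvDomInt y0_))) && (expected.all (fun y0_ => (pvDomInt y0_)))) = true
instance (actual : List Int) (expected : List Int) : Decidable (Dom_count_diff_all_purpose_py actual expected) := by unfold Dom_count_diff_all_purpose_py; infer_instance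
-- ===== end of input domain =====

-- B replaces A's destructive NULL-sentinel scans by a tally phase (insertion-ordered
-- association-list counters built in one pass each) plus a comparison phase (objective:
-- alternative); return values agree everywhere.

-- ===== PORT A =====
-- A stores NULL into counted slots; modelled as `Option Int` with `none` = NULL.
-- `s[j] == elem` is true only for a non-NULL slot holding elem (NULL == int is False).
def pvNullify (e : Int) : List (Option Int) → Int × List (Option Int)
  | [] => ((0 : Int), [])
  | o :: rest =>
    let p := pvNullify e rest
    match o with
    | some x => if x = e then (p.1 + 1, none :: p.2) else (p.1, some x :: p.2)
    | none => (p.1, none :: p.2)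

theorem pvNullify_len (e : Int) (l : List (Option Int)) : (pvNullify e l).2.length = l.length := by
  induction l with
  | nil => rfl
  | cons o rest ih =>
    cases o with
    | some x =>
      by_cases hx : x = e <;> simp [pvNullify, hx, ih]
    | none => simp [pvNullify, ih]

-- first loop of A: walks s left to right (the already-visited prefix is never read again,
-- so it is dropped from the state); at a non-NULL elem, the inner `for j in range(i, m)`
-- counts/NULLs elem in the suffix (s[i] itself contributes the +1), and the second inner
-- loop counts/NULLs elem in t.
def pvLoop1 (s t : List (Option Int)) (res : List (Int × Int × Int)) :
    List (Option Int) × List (Int × Int × Int) :=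
  match s with
  | [] => (t, res)
  | none :: rest => pvLoop1 rest t res
  | some e :: rest =>
    pvLoop1 (pvNullify e rest).2 (pvNullify e t).2
      (if (pvNullify e rest).1 + 1 ≠ (pvNullify e t).1
        then res ++ [((pvNullify e rest).1 + 1, (pvNullify e t).1, e)] else res)
termination_by s.length
decreasing_by
  all_goals simp only [List.length_cons, Nat.lt_succ_iff]
  all_goals try exact Nat.le_refl _
  all_goals exact Nat.le_of_eq (pvNullify_len _ _)

-- second loop of A over the mutated t
def pvLoop2 (t : List (Option Int)) (res : List (Int × Int × Int)) : List (Int × Int × Int) :=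
  match t with
  | [] => res
  | none :: rest => pvLoop2 rest res
  | some e :: rest =>
    pvLoop2 (pvNullify e rest).2 (res ++ [((0 : Int), (pvNullify e rest).1 + 1, e)])
termination_by t.length
decreasing_by
  all_goals simp only [List.length_cons, Nat.lt_succ_iff]
  all_goals try exact Nat.le_refl _
  all_goals exact Nat.le_of_eq (pvNullify_len _ _)

def count_diff_all_purpose_py (actual : List Int) (expected : List Int) : List (Int × Int × Int) :=
  let r := pvLoop1 (actual.map some) (expected.map some) []
  pvLoop2 r.1 r.2

-- ===== PORT B =====
-- inner `for p in pairs: … break / else: append` of Source B's tally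
def pvTallyAdd (x : Int) : List (Int × Int) → List (Int × Int)
  | [] => [(x, 1)]
  | p :: rest => if p.1 = x then (p.1, p.2 + 1) :: rest else p :: pvTallyAdd x rest

-- one-pass tally of a sequence (insertion-ordered association list elem ↦ count)
def pvTally (seq : List Int) : List (Int × Int) :=
  seq.foldl (fun acc x => pvTallyAdd x acc) []

-- Source B's find: first matching count, 0 if absent
def pvFind : List (Int × Int) → Int → Int
  | [], _ => 0
  | p :: rest, x => if p.1 = x then p.2 else pvFind rest x

def count_diff_all_purpose_py_alt (actual : List Int) (expected : List Int) : List (Int × Int × Int) :=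
  let cs := pvTally actual
  let ct := pvTally expected
  let r1 := cs.foldl (fun res p =>
    if p.2 ≠ pvFind ct p.1 then res ++ [(p.2, pvFind ct p.1, p.1)] else res) []
  ct.foldl (fun res p =>
    if pvFind cs p.1 = 0 then res ++ [((0 : Int), p.2, p.1)] else res) r1

-- ===== PRECONDITION & SPEC =====
def Spec_count_diff_all_purpose_py (actual : List Int) (expected : List Int) (out : List (Int × Int × Int)) : Prop := out = count_diff_all_purpose_py_alt actual expected
instance (actual : List Int) (expected : List Int) (out : List (Int × Int × Int)) : Decidable (Spec_count_diff_all_purpose_py actual expected out) := by unfold Spec_count_diff_all_purpose_py; infer_instance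

-- ===== CLAIM (what is proved, stated in full; the proofs are below) =====
def Claim_equal_count_diff_all_purpose_py : Prop := ∀ (actual : List Int) (expected : List Int), Dom_count_diff_all_purpose_py actual expected → Spec_count_diff_all_purpose_py actual expected (count_diff_all_purpose_py actual expected)

-- ===== LEMMAS AND PROOFS =====

-- intermediate reference form used only by the proof: seen-list traversal with full-list counts
def pvM1 (l : List Int) (seen : List Int) (s t : List Int) (res : List (Int × Int × Int)) :
    List Int × List (Int × Int × Int) :=
  match l with
  | [] => (seen, res)
  | e :: rest =>
    if e ∈ seen then pvM1 rest seen s t res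
    else
      pvM1 rest (seen ++ [e]) s t
        (if (s.count e : Int) ≠ (t.count e : Int)
          then res ++ [((s.count e : Int), (t.count e : Int), e)] else res)

def pvM2 (l : List Int) (seen : List Int) (t : List Int) (res : List (Int × Int × Int)) :
    List (Int × Int × Int) :=
  match l with
  | [] => res
  | e :: rest =>
    if e ∈ seen then pvM2 rest seen t res
    else pvM2 rest (seen ++ [e]) t (res ++ [((0 : Int), (t.count e : Int), e)])

-- first occurrences of l not in seen, in order
def pvUniq : List Int → List Int → List Int
  | _, [] => []
  | seen, x :: rest => if x ∈ seen then pvUniq seen rest else x :: pvUniq (seen ++ [x]) rest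

-- `pvMask seen` abstracts A's mutated list state: a slot is NULL iff its element was already handled
def pvMask (seen : List Int) (x : Int) : Option Int := if x ∈ seen then none else some x

theorem pvNullify_mask (e : Int) (seen : List Int) (he : e ∉ seen) (l : List Int) :
    pvNullify e (l.map (pvMask seen)) = ((l.count e : Int), l.map (pvMask (seen ++ [e]))) := by
  induction l with
  | nil => simp [pvNullify]
  | cons x rest ih =>
    by_cases hx : x ∈ seen
    · have hxe : ¬ (x = e) := fun h => he (h ▸ hx)
      simp [pvMask, hx, pvNullify, ih, hxe]
    · by_cases hxe : x = e
      · subst hxe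
        simp [pvMask, hx, pvNullify, ih]
      · simp [pvMask, hx, pvNullify, ih,
          fun h => (hxe : ¬ x = e) (by simpa using h)]

-- equation lemmas for the well-founded loops of port A
theorem pvLoop1_nil (t : List (Option Int)) (res : List (Int × Int × Int)) :
    pvLoop1 [] t res = (t, res) := by rw [pvLoop1.eq_def]

theorem pvLoop1_none (rest t : List (Option Int)) (res : List (Int × Int × Int)) :
    pvLoop1 (none :: rest) t res = pvLoop1 rest t res := by rw [pvLoop1.eq_def]

theorem pvLoop1_some (e : Int) (rest t : List (Option Int)) (res : List (Int × Int × Int)) :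
    pvLoop1 (some e :: rest) t res =
      pvLoop1 (pvNullify e rest).2 (pvNullify e t).2
        (if (pvNullify e rest).1 + 1 ≠ (pvNullify e t).1
          then res ++ [((pvNullify e rest).1 + 1, (pvNullify e t).1, e)] else res) := by
  rw [pvLoop1.eq_def]

theorem pvLoop2_nil (res : List (Int × Int × Int)) : pvLoop2 [] res = res := by
  rw [pvLoop2.eq_def]

theorem pvLoop2_none (rest : List (Option Int)) (res : List (Int × Int × Int)) :
    pvLoop2 (none :: rest) res = pvLoop2 rest res := by rw [pvLoop2.eq_def]

theorem pvLoop2_some (e : Int) (rest : List (Option Int)) (res : List (Int × Int × Int)) :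
    pvLoop2 (some e :: rest) res =
      pvLoop2 (pvNullify e rest).2 (res ++ [((0 : Int), (pvNullify e rest).1 + 1, e)]) := by
  rw [pvLoop2.eq_def]

-- after handling `e`, counts of other elements in the remaining suffix are unchanged
theorem count_shrink {l : List Int} {seen : List Int} {s : List Int} {e : Int}
    (hs : ∀ e', e' ∉ seen → s.count e' = (e :: l).count e') :
    ∀ e', e' ∉ seen ++ [e] → s.count e' = l.count e' := by
  intro e' he'
  simp only [List.mem_append, List.mem_singleton, not_or] at he'
  rw [hs e' he'.1, List.count_cons_of_ne (by intro h; exact he'.2 h.symm)]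

theorem count_skip {l : List Int} {seen : List Int} {s : List Int} {e : Int}
    (he : e ∈ seen)
    (hs : ∀ e', e' ∉ seen → s.count e' = (e :: l).count e') :
    ∀ e', e' ∉ seen → s.count e' = l.count e' := by
  intro e' he'
  rw [hs e' he', List.count_cons_of_ne (by intro h; exact he' (h ▸ he))]

theorem pvLoop1_eq (l : List Int) : ∀ (seen s t : List Int) (res : List (Int × Int × Int)),
    (∀ e, e ∉ seen → s.count e = l.count e) →
    pvLoop1 (l.map (pvMask seen)) (t.map (pvMask seen)) res
      = (t.map (pvMask (pvM1 l seen s t res).1), (pvM1 l seen s t res).2) := by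
  induction l with
  | nil => intro seen s t res _; simp [pvLoop1_nil, pvM1]
  | cons e rest ih =>
    intro seen s t res hs
    by_cases he : e ∈ seen
    · have hm : pvMask seen e = none := by simp [pvMask, he]
      rw [List.map_cons, hm, pvLoop1_none, ih seen s t res (count_skip he hs)]
      simp [pvM1, he]
    · have hm : pvMask seen e = some e := by simp [pvMask, he]
      rw [List.map_cons, hm, pvLoop1_some, pvNullify_mask e seen he rest,
        pvNullify_mask e seen he t]
      have hcs : ((rest.count e : Int)) + 1 = ((s.count e : Int)) := by
        have := hs e he
        rw [this, List.count_cons_self]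
        push_cast; ring
      simp only [hcs]
      rw [ih (seen ++ [e]) s t _ (count_shrink hs)]
      rw [show pvM1 (e :: rest) seen s t res
            = pvM1 rest (seen ++ [e]) s t
                (if ((s.count e : Int)) ≠ ((t.count e : Int))
                  then res ++ [((s.count e : Int), (t.count e : Int), e)] else res) from by
        simp [pvM1, he]]

theorem pvLoop2_eq (l : List Int) : ∀ (seen t : List Int) (res : List (Int × Int × Int)),
    (∀ e, e ∉ seen → t.count e = l.count e) →
    pvLoop2 (l.map (pvMask seen)) res = pvM2 l seen t res := by
  induction l with
  | nil => intro seen t res _; simp [pvLoop2_nil, pvM2]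
  | cons e rest ih =>
    intro seen t res ht
    by_cases he : e ∈ seen
    · have hm : pvMask seen e = none := by simp [pvMask, he]
      rw [List.map_cons, hm, pvLoop2_none, ih seen t res (count_skip he ht)]
      simp [pvM2, he]
    · have hm : pvMask seen e = some e := by simp [pvMask, he]
      rw [List.map_cons, hm, pvLoop2_some, pvNullify_mask e seen he rest]
      have hct : ((rest.count e : Int)) + 1 = ((t.count e : Int)) := by
        have := ht e he
        rw [this, List.count_cons_self]
        push_cast; ring
      rw [hct, ih (seen ++ [e]) t _ (count_shrink ht)]
      rw [show pvM2 (e :: rest) seen t res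
            = pvM2 rest (seen ++ [e]) t (res ++ [((0 : Int), (t.count e : Int), e)]) from by
        simp [pvM2, he]]

theorem map_mask_nil (l : List Int) : l.map (pvMask []) = l.map some := by
  simp [pvMask]

-- ===== pvUniq facts =====
theorem mem_pvUniq (l : List Int) : ∀ (seen : List Int) (x : Int),
    x ∈ pvUniq seen l ↔ x ∈ l ∧ x ∉ seen := by
  induction l with
  | nil => intro seen x; simp [pvUniq]
  | cons e rest ih =>
    intro seen x
    by_cases he : e ∈ seen
    · rw [show pvUniq seen (e :: rest) = pvUniq seen rest from by simp [pvUniq, he]]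
      rw [ih seen x]
      simp only [List.mem_cons]
      constructor
      · rintro ⟨h1, h2⟩; exact ⟨Or.inr h1, h2⟩
      · rintro ⟨h1 | h1, h2⟩
        · exact absurd (h1 ▸ he) h2
        · exact ⟨h1, h2⟩
    · rw [show pvUniq seen (e :: rest) = e :: pvUniq (seen ++ [e]) rest from by
        simp [pvUniq, he]]
      simp only [List.mem_cons, ih]
      constructor
      · rintro (rfl | ⟨h1, h2⟩)
        · exact ⟨Or.inl rfl, he⟩
        · simp only [List.mem_append, List.mem_singleton, not_or] at h2
          exact ⟨Or.inr h1, h2.1⟩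
      · rintro ⟨h1, h2⟩
        by_cases hx : x = e
        · exact Or.inl hx
        · exact Or.inr ⟨h1.resolve_left hx, by simp [hx, h2]⟩

theorem pvUniq_filter (l : List Int) : ∀ (seen : List Int),
    pvUniq seen l = (pvUniq [] l).filter (fun x => decide (x ∉ seen)) := by
  induction l with
  | nil => intro seen; simp [pvUniq]
  | cons e rest ih =>
    intro seen
    have h0 : pvUniq ([] : List Int) (e :: rest) = e :: pvUniq [e] rest := by
      simp [pvUniq]
    by_cases he : e ∈ seen
    · rw [show pvUniq seen (e :: rest) = pvUniq seen rest from by simp [pvUniq, he],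
        ih seen, h0]
      rw [List.filter_cons_of_neg (by simp [he]), ih [e], List.filter_filter]
      apply List.filter_congr
      intro x _
      by_cases hx : x ∈ seen
      · simp [hx]
      · have : ¬ x = e := fun h => hx (h ▸ he)
        simp [hx, this]
    · rw [show pvUniq seen (e :: rest) = e :: pvUniq (seen ++ [e]) rest from by
        simp [pvUniq, he], h0]
      rw [List.filter_cons_of_pos (by simp [he]), ih (seen ++ [e]), ih [e],
        List.filter_filter]
      congr 1
      apply List.filter_congr
      intro x _
      by_cases hx : x ∈ seen <;> by_cases hxe : x = e <;> simp [hx, hxe]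

-- ===== the seen-list form computes the pvUniq folds =====
theorem pvM1_spec (l : List Int) : ∀ (seen s t : List Int) (res : List (Int × Int × Int)),
    pvM1 l seen s t res
      = (seen ++ pvUniq seen l,
        (pvUniq seen l).foldl (fun r e =>
          if (s.count e : Int) ≠ (t.count e : Int)
            then r ++ [((s.count e : Int), (t.count e : Int), e)] else r) res) := by
  induction l with
  | nil => intro seen s t res; simp [pvM1, pvUniq]
  | cons e rest ih =>
    intro seen s t res
    by_cases he : e ∈ seen
    · simp only [pvM1, if_pos he, pvUniq, ih]
    · simp only [pvM1, if_neg he, pvUniq, ih, List.foldl_cons, List.append_assoc,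
        List.singleton_append]

theorem pvM2_spec (l : List Int) : ∀ (seen t : List Int) (res : List (Int × Int × Int)),
    pvM2 l seen t res
      = (pvUniq seen l).foldl (fun r e => r ++ [((0 : Int), (t.count e : Int), e)]) res := by
  induction l with
  | nil => intro seen t res; simp [pvM2, pvUniq]
  | cons e rest ih =>
    intro seen t res
    by_cases he : e ∈ seen
    · simp only [pvM2, if_pos he, pvUniq, ih]
    · simp only [pvM2, if_neg he, pvUniq, ih, List.foldl_cons]

-- ===== the tally computes counts over pvUniq =====
theorem pvTallyAdd_mem (x : Int) (acc : List (Int × Int))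
    (hx : x ∈ acc.map Prod.fst) (hnd : (acc.map Prod.fst).Nodup) (c : Int → Int) :
    (pvTallyAdd x acc).map (fun p => (p.1, p.2 + c p.1))
      = acc.map (fun p => (p.1, p.2 + (c p.1 + if p.1 = x then 1 else 0))) := by
  induction acc with
  | nil => simp at hx
  | cons p rest ih =>
    simp only [List.map_cons, List.mem_cons, List.nodup_cons] at hx hnd
    by_cases hp : p.1 = x
    · rw [show pvTallyAdd x (p :: rest) = (p.1, p.2 + 1) :: rest from by
        simp [pvTallyAdd, hp]]
      simp only [List.map_cons, if_pos hp]
      congr 1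
      · rw [show p.2 + 1 + c p.1 = p.2 + (c p.1 + 1) from by ring]
      · apply List.map_congr_left
        intro q hq
        have hq1 : q.1 ≠ x := by
          intro h
          apply hnd.1
          rw [hp, ← h]
          exact List.mem_map_of_mem hq
        simp [hq1]
    · rw [show pvTallyAdd x (p :: rest) = p :: pvTallyAdd x rest from by
        simp only [pvTallyAdd]; rw [if_neg hp]]
      simp only [List.map_cons, if_neg hp]
      congr 1
      · rw [show c p.1 + 0 = c p.1 from by ring]
      · exact ih (hx.resolve_left (fun h => hp h.symm)) hnd.2

theorem pvTallyAdd_not_mem (x : Int) (acc : List (Int × Int))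
    (hx : x ∉ acc.map Prod.fst) :
    pvTallyAdd x acc = acc ++ [(x, 1)] := by
  induction acc with
  | nil => rfl
  | cons p rest ih =>
    simp only [List.map_cons, List.mem_cons, not_or] at hx
    rw [show pvTallyAdd x (p :: rest) = p :: pvTallyAdd x rest from by
      simp only [pvTallyAdd]; rw [if_neg (fun h => hx.1 h.symm)], ih hx.2]
    rfl

theorem pvTally_gen (l : List Int) : ∀ (acc : List (Int × Int)),
    (acc.map Prod.fst).Nodup →
    l.foldl (fun a x => pvTallyAdd x a) acc
      = acc.map (fun p => (p.1, p.2 + (l.count p.1 : Int)))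
        ++ (pvUniq (acc.map Prod.fst) l).map (fun e => (e, (l.count e : Int))) := by
  induction l with
  | nil =>
    intro acc _
    simp [pvUniq]
  | cons x rest ih =>
    intro acc hnd
    by_cases hx : x ∈ acc.map Prod.fst
    · have hkeys : (pvTallyAdd x acc).map Prod.fst = acc.map Prod.fst := by
        clear hnd ih
        induction acc with
        | nil => simp at hx
        | cons p r ihr =>
          by_cases hp : p.1 = x
          · simp [pvTallyAdd, hp]
          · simp only [List.map_cons, List.mem_cons] at hx
            rw [show pvTallyAdd x (p :: r) = p :: pvTallyAdd x r from by
              simp only [pvTallyAdd]; rw [if_neg hp]]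
            simp [ihr (hx.resolve_left (fun h => hp h.symm))]
      rw [List.foldl_cons, ih (pvTallyAdd x acc) (hkeys ▸ hnd), hkeys]
      rw [show pvUniq (acc.map Prod.fst) (x :: rest) = pvUniq (acc.map Prod.fst) rest from by
        simp [pvUniq, hx]]
      congr 1
      · rw [pvTallyAdd_mem x acc hx hnd (fun y => (rest.count y : Int))]
        apply List.map_congr_left
        intro p _
        by_cases hp : p.1 = x
        · simp [List.count_cons, hp]
        · simp [List.count_cons, hp, show ¬x = p.1 from fun h => hp h.symm]
      · apply List.map_congr_left
        intro e he'
        have h1 : e ∉ acc.map Prod.fst := ((mem_pvUniq rest _ e).1 he').2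
        have h2 : ¬e = x := fun h => h1 (h.symm ▸ hx)
        simp [List.count_cons, h2, show ¬x = e from fun h => h2 h.symm]
    · rw [List.foldl_cons, pvTallyAdd_not_mem x acc hx]
      have hkeys : ((acc ++ [(x, 1)]).map Prod.fst) = acc.map Prod.fst ++ [x] := by simp
      have hnd' : ((acc ++ [(x, 1)]).map Prod.fst).Nodup := by
        rw [hkeys, List.nodup_append]
        refine ⟨hnd, List.nodup_singleton x, ?_⟩
        intro a ha b hb
        have hb' : b = x := by simpa using hb
        subst hb'
        intro h
        exact hx (h ▸ ha)
      rw [ih (acc ++ [(x, 1)]) hnd', hkeys]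
      rw [show pvUniq (acc.map Prod.fst) (x :: rest)
            = x :: pvUniq (acc.map Prod.fst ++ [x]) rest from by simp [pvUniq, hx]]
      simp only [List.map_append, List.map_cons]
      rw [List.append_assoc]
      congr 1
      · apply List.map_congr_left
        intro p hp
        have h1 : p.1 ≠ x := fun h => hx (h ▸ List.mem_map_of_mem hp)
        simp [List.count_cons, h1, show ¬x = p.1 from fun h => h1 h.symm]
      · rw [show ((x : Int), 1 + (rest.count x : Int)) = (x, ((x :: rest).count x : Int)) from by
          rw [show ((x :: rest).count x : Int) = (rest.count x : Int) + 1 from by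
            simp [List.count_cons]]
          rw [add_comm]]
        simp only [List.cons_append, List.map_nil, List.nil_append]
        congr 1
        apply List.map_congr_left
        intro e he'
        have h1 : e ∉ acc.map Prod.fst ++ [x] := ((mem_pvUniq rest _ e).1 he').2
        have h2 : ¬e = x := fun h => h1 (by simp [h])
        simp [List.count_cons, h2, show ¬x = e from fun h => h2 h.symm]

theorem pvTally_spec (l : List Int) :
    pvTally l = (pvUniq [] l).map (fun e => (e, (l.count e : Int))) := by
  have := pvTally_gen l [] (by simp)
  simpa [pvTally] using this

theorem pvFind_map (u : List Int) (f : Int → Int) (x : Int) :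
    pvFind (u.map (fun e => (e, f e))) x = if x ∈ u then f x else 0 := by
  induction u with
  | nil => simp [pvFind]
  | cons e rest ih =>
    by_cases he : e = x
    · subst he; simp [pvFind]
    · have hxe : ¬x = e := fun h => he h.symm
      simp [pvFind, he, ih, hxe]

theorem pvFind_tally (l : List Int) (x : Int) :
    pvFind (pvTally l) x = (l.count x : Int) := by
  rw [pvTally_spec, pvFind_map]
  by_cases hx : x ∈ l
  · simp [(mem_pvUniq l [] x).2 ⟨hx, by simp⟩]
  · have h1 : x ∉ pvUniq [] l := fun h => hx ((mem_pvUniq l [] x).1 h).1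
    simp [h1, List.count_eq_zero_of_not_mem hx]

theorem foldl_filter' {α β : Type} (p : β → Bool) (g : α → β → α) (l : List β) :
    ∀ (init : α), (l.filter p).foldl g init
      = l.foldl (fun r e => if p e then g r e else r) init := by
  induction l with
  | nil => intro init; rfl
  | cons x rest ih =>
    intro init
    by_cases hx : p x = true
    · rw [List.filter_cons_of_pos hx, List.foldl_cons, List.foldl_cons, if_pos hx, ih]
    · rw [List.filter_cons_of_neg (by simpa using hx), List.foldl_cons,
        if_neg (by simpa using hx), ih]

-- ===== VERDICT helpers: the two halves of B equal the seen-list folds =====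
theorem alt_eq_M (s t : List Int) :
    count_diff_all_purpose_py_alt s t
      = pvM2 t (pvM1 s [] s t []).1 t (pvM1 s [] s t []).2 := by
  rw [pvM1_spec, pvM2_spec]
  simp only [List.nil_append]
  unfold count_diff_all_purpose_py_alt
  rw [pvTally_spec s, pvTally_spec t]
  rw [List.foldl_map, List.foldl_map]
  have h1 : (fun (res : List (Int × Int × Int)) (e : Int) =>
      if ((s.count e : Int)) ≠ pvFind ((pvUniq [] t).map (fun e => (e, (t.count e : Int)))) e
        then res ++ [((s.count e : Int),
          pvFind ((pvUniq [] t).map (fun e => (e, (t.count e : Int)))) e, e)] else res)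
      = (fun (r : List (Int × Int × Int)) (e : Int) =>
      if ((s.count e : Int)) ≠ ((t.count e : Int))
        then r ++ [((s.count e : Int), (t.count e : Int), e)] else r) := by
    funext r e
    rw [show pvFind ((pvUniq [] t).map (fun e => (e, (t.count e : Int)))) e
          = (t.count e : Int) from by rw [← pvTally_spec, pvFind_tally]]
  rw [h1]
  have h2 : (fun (res : List (Int × Int × Int)) (e : Int) =>
      if pvFind ((pvUniq [] s).map (fun e => (e, (s.count e : Int)))) e = 0
        then res ++ [((0 : Int), (t.count e : Int), e)] else res)
      = (fun (r : List (Int × Int × Int)) (e : Int) =>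
      if decide (e ∉ pvUniq [] s) = true then r ++ [((0 : Int), (t.count e : Int), e)] else r) := by
    funext r e
    rw [show pvFind ((pvUniq [] s).map (fun e => (e, (s.count e : Int)))) e
          = (s.count e : Int) from by rw [← pvTally_spec, pvFind_tally]]
    by_cases he : e ∈ s
    · rw [if_neg (by simpa using (Nat.cast_pos.2 (List.count_pos_iff.2 he)).ne'),
        if_neg (by simp [(mem_pvUniq s [] e).2 ⟨he, by simp⟩])]
    · rw [if_pos (by simp [List.count_eq_zero_of_not_mem he]),
        if_pos (by simp; intro h; exact absurd ((mem_pvUniq s [] e).1 h).1 he)]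
  rw [h2]
  rw [pvUniq_filter t (pvUniq [] s), foldl_filter']

-- ===== VERDICT (by name: the statement is the Claim_ definition above) =====
theorem count_diff_all_purpose_py_spec : Claim_equal_count_diff_all_purpose_py := by
  intro actual expected _
  have h1 := pvLoop1_eq actual [] actual expected [] (by intro e _; rfl)
  simp only [map_mask_nil] at h1
  unfold Spec_count_diff_all_purpose_py
  simp only [count_diff_all_purpose_py]
  rw [h1, alt_eq_M]
  exact pvLoop2_eq expected (pvM1 actual [] actual expected []).1 expected
    (pvM1 actual [] actual expected []).2 (by intro e _; rfl)
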